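-- pv_equiv track=rewrite | github.com/Nandan-Aditey/Game_Theory | Dominant Strategies/Very_Weakly_Dominant_Strategy.py | equilibria_product
-- ===== SOURCE A (Python) =====
-- def equilibria_product(Strategies):
--     if not Strategies:
--         return [()]
--     rest_product = equilibria_product(Strategies[1:])
--     result = []
--     for strat in Strategies[0]:
--         for prod in rest_product:
--             result.append((strat,) + prod)
--     return result
-- ===== SOURCE B (Python) =====
-- def equilibria_product(Strategies):
--     result = [()]
--     for S in Strategies:
--         result = [r + (x,) for r in result for x in S]
--     return result
-- ===== Notes on version B (the rewrite author's own statement) =====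
-- stated objective: idiomatic
-- what changed: Replaced the tail recursion on the list of strategy sets by an iterative left-to-right fold that extends each partial tuple by appending one strategy per step.
import Mathlib
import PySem

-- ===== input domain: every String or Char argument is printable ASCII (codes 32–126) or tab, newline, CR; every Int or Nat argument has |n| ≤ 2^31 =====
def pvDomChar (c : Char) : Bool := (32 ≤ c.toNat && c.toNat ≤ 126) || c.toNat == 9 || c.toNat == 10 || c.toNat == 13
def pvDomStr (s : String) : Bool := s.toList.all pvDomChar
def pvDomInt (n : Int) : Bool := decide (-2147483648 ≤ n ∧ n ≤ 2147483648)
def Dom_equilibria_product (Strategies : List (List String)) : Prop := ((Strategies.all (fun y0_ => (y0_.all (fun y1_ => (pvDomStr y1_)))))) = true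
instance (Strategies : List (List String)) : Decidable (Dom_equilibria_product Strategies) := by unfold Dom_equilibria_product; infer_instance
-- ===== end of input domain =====

-- B replaces A's tail recursion by an iterative fold growing partial tuples by appending (idiomatic, same cost).


-- ===== PORT A =====
-- A: recursion on the tail, then two nested loops appending (strat, ) + prod.
def equilibria_product (Strategies : List (List String)) : List (List String) :=
  match Strategies with
  | [] => [[]]
  | S :: rest =>
    let rest_product := equilibria_product rest
    S.foldl (fun result strat =>
      rest_product.foldl (fun result prod => result ++ [strat :: prod]) result) []

-- ===== PORT B =====
-- B: left fold over Strategies; each step extends every partial tuple r by every x in S.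
def equilibria_product_alt (Strategies : List (List String)) : List (List String) :=
  Strategies.foldl (fun result S => result.flatMap (fun r => S.map (fun x => r ++ [x]))) [[]]

-- ===== PRECONDITION & SPEC =====
def Spec_equilibria_product (Strategies : List (List String)) (out : List (List String)) : Prop := out = equilibria_product_alt Strategies
instance (Strategies : List (List String)) (out : List (List String)) : Decidable (Spec_equilibria_product Strategies out) := by unfold Spec_equilibria_product; infer_instance

-- ===== CLAIM (what is proved, stated in full; the proofs are below) =====
def Claim_equal_equilibria_product : Prop := ∀ (Strategies : List (List String)), Dom_equilibria_product Strategies → Spec_equilibria_product Strategies (equilibria_product Strategies)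

-- ===== LEMMAS AND PROOFS =====

-- A's cons-step equals a flatMap of maps.
lemma equilibria_product_cons (S : List String) (rest : List (List String)) :
    equilibria_product (S :: rest)
      = S.flatMap (fun s => (equilibria_product rest).map (fun p => s :: p)) := by
  show S.foldl (fun result strat =>
      (equilibria_product rest).foldl (fun result prod => result ++ [strat :: prod]) result) []
    = _
  simp only [PySem.List.foldl_append_singleton_eq_map, PySem.List.foldl_append_eq_flatMap,
    List.nil_append]

-- B's fold from any accumulator, in terms of A's recursion.
lemma alt_fold_invariant (l : List (List String)) :
    ∀ acc : List (List String),
      l.foldl (fun result S => result.flatMap (fun r => S.map (fun x => r ++ [x]))) acc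
        = acc.flatMap (fun r => (equilibria_product l).map (fun p => r ++ p)) := by
  induction l with
  | nil => intro acc; simp [equilibria_product]
  | cons S rest ih =>
      intro acc
      simp only [List.foldl_cons, ih, equilibria_product_cons]
      simp [List.flatMap_assoc, List.map_flatMap, List.flatMap_map, List.append_assoc, Function.comp_def]

-- ===== VERDICT (by name: the statement is the Claim_ definition above) =====
theorem equilibria_product_spec : Claim_equal_equilibria_product := by
  intro Strategies _
  show equilibria_product Strategies = equilibria_product_alt Strategies
  rw [equilibria_product_alt, alt_fold_invariant]
  simp
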